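-- pv_equiv track=rewrite | github.com/ovaomnis/dats-zomiedef | fire_zombie.py | is_valid_build_position
-- ===== SOURCE A (Python) =====
-- def is_valid_build_position(x, y, base_cells, zombies, enemyBlocks, zpots):
--     """Проверяет, можно ли строить на данной позиции, учитывая существующие ограничения."""
--     # Проверяем, занята ли уже эта позиция клеткой базы
--     if any(cell['x'] == x and cell['y'] == y for cell in base_cells):
--         return False
--     if zombies:
--         # Проверяем, есть ли зомби на этой позиции или рядом с ней
--         if any(zombie['x'] == x and zombie['y'] == y for zombie in zombies):
--             return False
--         if any(zombie['x'] == x + dx and zombie['y'] == y + dy for zombie in zombies for dx in [-1, 0, 1] for dy in [-1, 0, 1]):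
--             return False
--
--     # Проверяем, находится ли позиция слишком близко к вражеским блокам или точкам респавна
--     min_distance_to_enemy = 1  # Минимальное расстояние до вражеских блоков
--     min_distance_to_zpot = 1   # Минимальное расстояние до точек респавна зомби
--     if enemyBlocks:
--         if any(abs(enemyBlock['x'] - x) <= min_distance_to_enemy and abs(enemyBlock['y'] - y) <= min_distance_to_enemy for enemyBlock in enemyBlocks):
--             return False
--     if any(abs(zpot['x'] - x) <= min_distance_to_zpot and abs(zpot['y'] - y) <= min_distance_to_zpot for zpot in zpots):
--         return False
--
--     return True
-- ===== SOURCE B (Python) =====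
-- def is_valid_build_position(x, y, base_cells, zombies, enemyBlocks, zpots):
--     """Column-index rewrite: every check (base exact match, zombie/enemy/zpot
--     Chebyshev-1 box) is one uniform stage that buckets the group's points by
--     their x column, then probes only the relevant columns of the query."""
--     for pts, r in ((base_cells, 0), (zombies, 1), (enemyBlocks, 1), (zpots, 1)):
--         cols = {}
--         for p in pts:
--             cols.setdefault(p['x'], []).append(p)
--         for cx in range(x - r, x + r + 1):
--             for p in cols.get(cx, ()):
--                 if abs(p['y'] - y) <= r:
--                     return False
--     return True
-- ===== Notes on version B (the rewrite author's own statement) =====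
-- stated objective: alternative
-- what changed: Replaces A's four bespoke linear scans with abs-distance tests by one uniform stage (radius 0 for base, 1 for zombies/enemies/zpots) that buckets each group's points into a hash index keyed by x column and probes only the query's 1 or 3 relevant columns, subsuming A's redundant exact-zombie check.
-- outside the precondition, e.g. on is_valid_build_position(0, 0, [{'x': 0, 'y': 0}, {}], [], [], []): A returns False, B raises KeyError; on is_valid_build_position(0, 0, [], [{'x': 0, 'y': 0}, {}], [], []): A returns False, B raises KeyError
import Mathlib
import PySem

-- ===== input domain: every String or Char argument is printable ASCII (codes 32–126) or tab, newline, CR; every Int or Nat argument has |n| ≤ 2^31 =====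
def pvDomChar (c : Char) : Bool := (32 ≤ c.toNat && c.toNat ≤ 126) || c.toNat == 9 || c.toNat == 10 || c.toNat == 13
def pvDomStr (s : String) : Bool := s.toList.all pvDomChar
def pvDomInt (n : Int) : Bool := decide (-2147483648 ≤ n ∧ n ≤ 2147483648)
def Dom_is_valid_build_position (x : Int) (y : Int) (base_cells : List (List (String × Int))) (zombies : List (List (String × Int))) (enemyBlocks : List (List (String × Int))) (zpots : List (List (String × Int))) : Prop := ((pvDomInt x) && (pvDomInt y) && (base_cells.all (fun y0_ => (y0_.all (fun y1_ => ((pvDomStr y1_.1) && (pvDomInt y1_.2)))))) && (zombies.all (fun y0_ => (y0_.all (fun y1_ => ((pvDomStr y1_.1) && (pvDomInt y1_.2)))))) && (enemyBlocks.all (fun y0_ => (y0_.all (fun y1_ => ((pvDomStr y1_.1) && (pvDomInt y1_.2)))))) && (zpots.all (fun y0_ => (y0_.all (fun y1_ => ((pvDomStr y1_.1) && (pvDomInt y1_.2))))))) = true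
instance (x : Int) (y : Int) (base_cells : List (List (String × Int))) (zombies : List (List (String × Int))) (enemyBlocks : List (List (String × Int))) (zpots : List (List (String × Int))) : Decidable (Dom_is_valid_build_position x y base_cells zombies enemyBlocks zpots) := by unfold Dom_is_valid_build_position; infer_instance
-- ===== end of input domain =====

-- ===== PORT A =====
-- B inverts A's per-list neighborhood scans into one precomputed dilated blocked-cell set (objective: alternative).
-- dict[k] lookup (first match in the association list; KeyError = none, excluded by Pre_)
def pvLook (c : List (String × Int)) (k : String) : Option Int := List.lookup k c

def is_valid_build_position (x : Int) (y : Int) (base_cells : List (List (String × Int))) (zombies : List (List (String × Int))) (enemyBlocks : List (List (String × Int))) (zpots : List (List (String × Int))) : Bool :=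
  if base_cells.any (fun cell => pvLook cell "x" == some x && pvLook cell "y" == some y) then false
  else if !zombies.isEmpty && zombies.any (fun z => pvLook z "x" == some x && pvLook z "y" == some y) then false
  else if !zombies.isEmpty && zombies.any (fun z =>
      ([-1, 0, 1] : List Int).any (fun dx => ([-1, 0, 1] : List Int).any (fun dy =>
        pvLook z "x" == some (x + dx) && pvLook z "y" == some (y + dy)))) then false
  else
    let min_distance_to_enemy : Int := 1
    let min_distance_to_zpot : Int := 1
    if !enemyBlocks.isEmpty && enemyBlocks.any (fun e =>
        match pvLook e "x", pvLook e "y" with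
        | some ex, some ey => decide (|ex - x| ≤ min_distance_to_enemy ∧ |ey - y| ≤ min_distance_to_enemy)
        | _, _ => false) then false
    else if zpots.any (fun p =>
        match pvLook p "x", pvLook p "y" with
        | some px, some py => decide (|px - x| ≤ min_distance_to_zpot ∧ |py - y| ≤ min_distance_to_zpot)
        | _, _ => false) then false
    else true

-- ===== PORT B =====
-- cols.setdefault(p['x'], []).append(p)
def pvCols (pts : List (List (String × Int))) : PySem.Dict (Option Int) (List (List (String × Int))) :=
  pts.foldl (fun d p => d.insert (pvLook p "x") (d.getD (pvLook p "x") [] ++ [p])) PySem.Dict.empty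

-- one stage of radius r: bucket pts by x column, probe columns x-r .. x+r, test |p['y'] - y| <= r
def pvStage (x y r : Int) (pts : List (List (String × Int))) : Bool :=
  let cols := pvCols pts
  (PySem.List.pyRange (x - r) (x + r + 1) 1).any (fun cx =>
    (cols.getD (some cx) []).any (fun p =>
      match pvLook p "y" with
      | some py => decide (|py - y| ≤ r)
      | none => false))

def is_valid_build_position_alt (x : Int) (y : Int) (base_cells : List (List (String × Int))) (zombies : List (List (String × Int))) (enemyBlocks : List (List (String × Int))) (zpots : List (List (String × Int))) : Bool :=
  -- for pts, r in ((base_cells, 0), (zombies, 1), (enemyBlocks, 1), (zpots, 1)): return False on a hit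
  if pvStage x y 0 base_cells then false
  else if pvStage x y 1 zombies then false
  else if pvStage x y 1 enemyBlocks then false
  else if pvStage x y 1 zpots then false
  else true

-- ===== PRECONDITION & SPEC =====
-- c is the base/exact-match cell (x, y); implies both keys are present
def pvHitCell (x y : Int) (c : List (String × Int)) : Bool :=
  pvLook c "x" == some x && pvLook c "y" == some y

-- c lies in the 3x3 box around (x, y); implies both keys are present
def pvHitBox (x y : Int) (c : List (String × Int)) : Bool :=
  ([-1, 0, 1] : List Int).any (fun dx => ([-1, 0, 1] : List Int).any (fun dy =>
    pvLook c "x" == some (x + dx) && pvLook c "y" == some (y + dy)))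

-- an exact-match pass reads c without KeyError: "x" present, "y" present if the x-values are equal
def pvSafeEq (x : Int) (c : List (String × Int)) : Bool :=
  (pvLook c "x").isSome && ((pvLook c "x").all (fun v => decide (v ≠ x) || (pvLook c "y").isSome))

-- a distance-1 pass reads c without KeyError: "x" present, "y" present if the x-values are within 1
def pvSafeBox (x : Int) (c : List (String × Int)) : Bool :=
  (pvLook c "x").isSome && ((pvLook c "x").all (fun v => decide (1 < |v - x|) || (pvLook c "y").isSome))

-- Pre_ admits inputs whose dicts carry every key the checks that actually run look up ("x", and "y" when
-- the x-value matches / is within 1), later stages only being required when no earlier stage already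
-- returned False (a base-cell hit, a zombie/enemy box hit). Outside Pre_ B raises KeyError, and A raises
-- too except where an any()-prefix short-circuit lets it skip the missing key and still return.
def Pre_is_valid_build_position (x : Int) (y : Int) (base_cells : List (List (String × Int))) (zombies : List (List (String × Int))) (enemyBlocks : List (List (String × Int))) (zpots : List (List (String × Int))) : Prop :=
  (∀ c ∈ base_cells, pvSafeEq x c = true) ∧
  ((∃ c ∈ base_cells, pvHitCell x y c = true) ∨
    ((∀ c ∈ zombies, pvSafeBox x c = true) ∧
     ((∃ c ∈ zombies, pvHitBox x y c = true) ∨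
       ((∀ c ∈ enemyBlocks, pvSafeBox x c = true) ∧
        ((∃ c ∈ enemyBlocks, pvHitBox x y c = true) ∨
          (∀ c ∈ zpots, pvSafeBox x c = true))))))

instance (x : Int) (y : Int) (base_cells : List (List (String × Int))) (zombies : List (List (String × Int))) (enemyBlocks : List (List (String × Int))) (zpots : List (List (String × Int))) : Decidable (Pre_is_valid_build_position x y base_cells zombies enemyBlocks zpots) := by unfold Pre_is_valid_build_position; infer_instance

def pvWitness_is_valid_build_position : Int × Int × (List (List (String × Int))) × (List (List (String × Int))) × (List (List (String × Int))) × (List (List (String × Int))) :=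
  (0, 0, [[("x", 3), ("y", 3)]], [[("x", 2), ("y", 2)]], [], [[("x", 5), ("y", 5)]])

def Spec_is_valid_build_position (x : Int) (y : Int) (base_cells : List (List (String × Int))) (zombies : List (List (String × Int))) (enemyBlocks : List (List (String × Int))) (zpots : List (List (String × Int))) (out : Bool) : Prop := out = is_valid_build_position_alt x y base_cells zombies enemyBlocks zpots
instance (x : Int) (y : Int) (base_cells : List (List (String × Int))) (zombies : List (List (String × Int))) (enemyBlocks : List (List (String × Int))) (zpots : List (List (String × Int))) (out : Bool) : Decidable (Spec_is_valid_build_position x y base_cells zombies enemyBlocks zpots out) := by unfold Spec_is_valid_build_position; infer_instance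


-- ===== CLAIM (what is proved, stated in full; the proofs are below) =====
def Claim_equal_is_valid_build_position : Prop := ∀ (x : Int) (y : Int) (base_cells : List (List (String × Int))) (zombies : List (List (String × Int))) (enemyBlocks : List (List (String × Int))) (zpots : List (List (String × Int))), Dom_is_valid_build_position x y base_cells zombies enemyBlocks zpots → Pre_is_valid_build_position x y base_cells zombies enemyBlocks zpots → Spec_is_valid_build_position x y base_cells zombies enemyBlocks zpots (is_valid_build_position x y base_cells zombies enemyBlocks zpots)

-- ===== LEMMAS AND PROOFS =====

-- (a, b) is one of the coordinate pairs listed in l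
def pvAt (l : List (List (String × Int))) (a b : Int) : Prop :=
  ∃ c ∈ l, pvLook c "x" = some a ∧ pvLook c "y" = some b

-- obstacle list l blocks (x, y): some listed point lies in the 3x3 box around (x, y)
def pvBox (l : List (List (String × Int))) (x y : Int) : Prop :=
  ∃ dx ∈ ([-1, 0, 1] : List Int), ∃ dy ∈ ([-1, 0, 1] : List Int), pvAt l (x + dx) (y + dy)

theorem pvAt_any (l : List (List (String × Int))) (a b : Int) :
    (l.any (fun c => pvLook c "x" == some a && pvLook c "y" == some b) = true) ↔ pvAt l a b := by
  simp [pvAt, List.any_eq_true]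

theorem abs_exists (l : List (List (String × Int))) (x y : Int) :
    (∃ c ∈ l, ∃ px py, pvLook c "x" = some px ∧ pvLook c "y" = some py ∧
        |px - x| ≤ (1 : Int) ∧ |py - y| ≤ (1 : Int))
      ↔ pvBox l x y := by
  simp only [pvBox, pvAt]
  constructor
  · rintro ⟨c, hc, px, py, hx, hy, h1, h2⟩
    refine ⟨px - x, ?_, py - y, ?_, c, hc, ?_, ?_⟩
    · simp only [List.mem_cons, List.not_mem_nil, or_false]
      rw [abs_le] at h1; omega
    · simp only [List.mem_cons, List.not_mem_nil, or_false]
      rw [abs_le] at h2; omega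
    · rw [hx]; congr 1; omega
    · rw [hy]; congr 1; omega
  · rintro ⟨dx, hdx, dy, hdy, c, hc, hx, hy⟩
    simp only [List.mem_cons, List.not_mem_nil, or_false] at hdx hdy
    refine ⟨c, hc, x + dx, y + dy, hx, hy, ?_, ?_⟩ <;> rw [abs_le] <;> omega

theorem abs_any (l : List (List (String × Int))) (x y : Int) :
    (l.any (fun c =>
        match pvLook c "x", pvLook c "y" with
        | some ex, some ey => decide (|ex - x| ≤ (1 : Int) ∧ |ey - y| ≤ (1 : Int))
        | _, _ => false) = true)
      ↔ pvBox l x y := by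
  rw [← abs_exists]
  simp only [List.any_eq_true]
  constructor
  · rintro ⟨c, hc, h⟩
    cases hx : pvLook c "x" with
    | none => rw [hx] at h; simp at h
    | some ex =>
      cases hy : pvLook c "y" with
      | none => rw [hx, hy] at h; simp at h
      | some ey =>
        rw [hx, hy] at h
        simp only [decide_eq_true_eq] at h
        exact ⟨c, hc, ex, ey, hx, hy, h.1, h.2⟩
  · rintro ⟨c, hc, px, py, hx, hy, h1, h2⟩
    refine ⟨c, hc, ?_⟩
    rw [hx, hy]
    simp only [decide_eq_true_eq]
    exact ⟨h1, h2⟩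

theorem zbox_any (l : List (List (String × Int))) (x y : Int) :
    (l.any (fun z =>
      ([-1, 0, 1] : List Int).any (fun dx => ([-1, 0, 1] : List Int).any (fun dy =>
        pvLook z "x" == some (x + dx) && pvLook z "y" == some (y + dy)))) = true)
      ↔ pvBox l x y := by
  simp only [List.any_eq_true, pvBox, pvAt, beq_iff_eq, Bool.and_eq_true]
  constructor
  · rintro ⟨c, hc, dx, hdx, dy, hdy, h1, h2⟩
    exact ⟨dx, hdx, dy, hdy, c, hc, h1, h2⟩
  · rintro ⟨dx, hdx, dy, hdy, c, hc, h1, h2⟩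
    exact ⟨c, hc, dx, hdx, dy, hdy, h1, h2⟩

theorem a_char (x y : Int) (b z e p : List (List (String × Int))) :
    (is_valid_build_position x y b z e p = true)
      ↔ ¬ pvAt b x y ∧ ¬ pvBox z x y ∧ ¬ pvBox e x y ∧ ¬ pvBox p x y := by
  unfold is_valid_build_position
  split_ifs with h1 h2 h3
  · simp only [false_iff]
    rw [pvAt_any] at h1
    intro h; exact h.1 h1
  · simp only [false_iff]
    rw [Bool.and_eq_true, pvAt_any] at h2
    intro h
    exact h.2.1 ⟨0, by simp, 0, by simp, by simpa using h2.2⟩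
  · simp only [false_iff]
    rw [Bool.and_eq_true, zbox_any] at h3
    intro h; exact h.2.1 h3.2
  · dsimp only
    split_ifs with h4 h5
    · simp only [false_iff]
      rw [Bool.and_eq_true, abs_any] at h4
      intro h; exact h.2.2.1 h4.2
    · simp only [false_iff]
      rw [abs_any] at h5
      intro h; exact h.2.2.2 h5
    · simp only [true_iff]
      refine ⟨fun hh => h1 ((pvAt_any b x y).mpr hh), ?_, ?_, ?_⟩
      · intro hz
        have hne : z ≠ [] := by
          rcases hz with ⟨dx, _, dy, _, c, hc, _⟩
          exact List.ne_nil_of_mem hc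
        exact h3 (by rw [Bool.and_eq_true, zbox_any]; exact ⟨by simp [hne], hz⟩)
      · intro he
        have hne : e ≠ [] := by
          rcases he with ⟨dx, _, dy, _, c, hc, _⟩
          exact List.ne_nil_of_mem hc
        exact h4 (by rw [Bool.and_eq_true, abs_any]; exact ⟨by simp [hne], he⟩)
      · intro hp
        exact h5 (by rw [abs_any]; exact hp)

-- the column index groups exactly by the looked-up x key
theorem mem_cols_aux (pts : List (List (String × Int)))
    (d : PySem.Dict (Option Int) (List (List (String × Int)))) (k : Option Int)
    (q : List (String × Int)) :
    (q ∈ (pts.foldl (fun d p => d.insert (pvLook p "x") (d.getD (pvLook p "x") [] ++ [p])) d).getD k [])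
      ↔ q ∈ d.getD k [] ∨ (q ∈ pts ∧ pvLook q "x" = k) := by
  induction pts generalizing d with
  | nil => simp
  | cons hd tl ih =>
    simp only [List.foldl_cons, ih, PySem.Dict.getD_insert, List.mem_cons]
    by_cases hk : k = pvLook hd "x"
    · subst hk
      rw [if_pos rfl]
      simp only [List.mem_append, List.mem_singleton]
      constructor
      · rintro ((h | rfl) | ⟨hq, hqk⟩)
        · exact Or.inl h
        · exact Or.inr ⟨Or.inl rfl, rfl⟩
        · exact Or.inr ⟨Or.inr hq, hqk⟩
      · rintro (h | ⟨rfl | hq, hqk⟩)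
        · exact Or.inl (Or.inl h)
        · exact Or.inl (Or.inr rfl)
        · exact Or.inr ⟨hq, hqk⟩
    · rw [if_neg hk]
      constructor
      · rintro (h | ⟨hq, hqk⟩)
        · exact Or.inl h
        · exact Or.inr ⟨Or.inr hq, hqk⟩
      · rintro (h | ⟨rfl | hq, hqk⟩)
        · exact Or.inl h
        · exact absurd hqk.symm hk
        · exact Or.inr ⟨hq, hqk⟩

theorem mem_cols (pts : List (List (String × Int))) (k : Option Int) (q : List (String × Int)) :
    (q ∈ (pvCols pts).getD k []) ↔ q ∈ pts ∧ pvLook q "x" = k := by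
  rw [pvCols, mem_cols_aux]
  simp [PySem.Dict.getD_empty]

theorem stage_char (x y r : Int) (pts : List (List (String × Int))) :
    (pvStage x y r pts = true)
      ↔ ∃ c ∈ pts, ∃ px py, pvLook c "x" = some px ∧ pvLook c "y" = some py ∧
          |px - x| ≤ r ∧ |py - y| ≤ r := by
  unfold pvStage
  simp only [List.any_eq_true, PySem.List.mem_pyRange_one]
  constructor
  · rintro ⟨cx, hcx, q, hq, h⟩
    rw [mem_cols] at hq
    cases hy : pvLook q "y" with
    | none => rw [hy] at h; simp at h
    | some py =>
      rw [hy] at h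
      simp only [decide_eq_true_eq] at h
      exact ⟨q, hq.1, cx, py, hq.2, hy, by rw [abs_le]; omega, h⟩
  · rintro ⟨c, hc, px, py, hx, hy, h1, h2⟩
    rw [abs_le] at h1
    refine ⟨px, by omega, c, (mem_cols pts (some px) c).mpr ⟨hc, hx⟩, ?_⟩
    rw [hy]
    simpa using h2

theorem stage0_char (x y : Int) (pts : List (List (String × Int))) :
    (pvStage x y 0 pts = true) ↔ pvAt pts x y := by
  rw [stage_char]
  simp only [pvAt]
  constructor
  · rintro ⟨c, hc, px, py, hx, hy, h1, h2⟩
    have hpx : px = x := by rw [abs_le] at h1; omega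
    have hpy : py = y := by rw [abs_le] at h2; omega
    exact ⟨c, hc, hpx ▸ hx, hpy ▸ hy⟩
  · rintro ⟨c, hc, hx, hy⟩
    exact ⟨c, hc, x, y, hx, hy, by simp, by simp⟩

theorem stage1_char (x y : Int) (pts : List (List (String × Int))) :
    (pvStage x y 1 pts = true) ↔ pvBox pts x y := by
  rw [stage_char, abs_exists]

theorem alt_char (x y : Int) (b z e p : List (List (String × Int))) :
    (is_valid_build_position_alt x y b z e p = true)
      ↔ ¬ pvAt b x y ∧ ¬ pvBox z x y ∧ ¬ pvBox e x y ∧ ¬ pvBox p x y := by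
  unfold is_valid_build_position_alt
  split_ifs with h1 h2 h3 h4
  · simp only [false_iff]; rw [stage0_char] at h1; intro h; exact h.1 h1
  · simp only [false_iff]; rw [stage1_char] at h2; intro h; exact h.2.1 h2
  · simp only [false_iff]; rw [stage1_char] at h3; intro h; exact h.2.2.1 h3
  · simp only [false_iff]; rw [stage1_char] at h4; intro h; exact h.2.2.2 h4
  · simp only [true_iff]
    exact ⟨fun h => h1 ((stage0_char x y b).mpr h),
           fun h => h2 ((stage1_char x y z).mpr h),
           fun h => h3 ((stage1_char x y e).mpr h),
           fun h => h4 ((stage1_char x y p).mpr h)⟩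

theorem main_eq (x y : Int) (b z e p : List (List (String × Int))) :
    is_valid_build_position x y b z e p = is_valid_build_position_alt x y b z e p := by
  rw [Bool.eq_iff_iff, a_char, alt_char]

-- ===== VERDICT (by name: the statement is the Claim_ definition above) =====
theorem is_valid_build_position_spec : Claim_equal_is_valid_build_position := by
  intro x y b z e p _ _
  unfold Spec_is_valid_build_position
  exact main_eq x y b z e p
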